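-- pv_equiv track=rewrite | github.com/sjmason777/kttc | src/kttc/agents/fp_filter.py | _term_in_description
-- ===== SOURCE A (Python) =====
-- def _term_in_description(term: str, description_lower: str) -> bool:
--     """Check if a term appears in the description."""
--     patterns = [
--         f'"{term}"',
--         f"'{term}'",
--         f" {term} ",
--         f" {term}.",
--         f" {term},",
--         f"[{term}]",
--         f"({term})",
--         f" {term}\n",
--     ]
--     return any(pattern in description_lower for pattern in patterns)
-- ===== SOURCE B (Python) =====
-- def _term_in_description(term: str, description_lower: str) -> bool:
--     """Check if a term appears in the description."""
--     pairs = {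
--         ('"', '"'), ("'", "'"), (' ', ' '), (' ', '.'),
--         (' ', ','), ('[', ']'), ('(', ')'), (' ', '\n'),
--     }
--     s = description_lower
--     n = len(term)
--     j = s.find(term, 1)
--     while j != -1:
--         if j + n < len(s) and (s[j - 1], s[j + n]) in pairs:
--             return True
--         j = s.find(term, j + 1)
--     return False
-- ===== Notes on version B (the rewrite author's own statement) =====
-- stated objective: faster
-- what changed: Instead of building 8 delimited pattern strings and scanning the description once per pattern, B walks the occurrences of term once with str.find and checks the bracketing character pair against a set of 8 allowed (before, after) pairs.
import Mathlib
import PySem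

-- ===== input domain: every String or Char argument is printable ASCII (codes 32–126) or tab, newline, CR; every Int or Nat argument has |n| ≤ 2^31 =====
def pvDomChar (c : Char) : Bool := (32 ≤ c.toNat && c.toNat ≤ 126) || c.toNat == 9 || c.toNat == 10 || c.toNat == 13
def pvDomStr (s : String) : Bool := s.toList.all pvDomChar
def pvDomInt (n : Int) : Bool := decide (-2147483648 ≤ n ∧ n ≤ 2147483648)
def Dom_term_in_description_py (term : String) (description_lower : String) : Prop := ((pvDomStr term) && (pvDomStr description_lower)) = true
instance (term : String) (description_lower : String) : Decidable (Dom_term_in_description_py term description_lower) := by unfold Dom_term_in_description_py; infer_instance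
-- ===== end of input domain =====

-- B replaces A's 8 delimited pattern strings (each scanned separately) by one walk
-- over the occurrences of `term`, checking the bracketing (before, after) character
-- pair against a set of 8 allowed pairs (objective: faster, constant-factor).

-- ===== PORT A =====
-- strings are handled as their code-point lists; the f-string concatenations are list appends
def term_in_description_py (term : String) (description_lower : String) : Bool :=
  let t := term.toList
  let s := description_lower.toList
  let patterns : List (List Char) :=
    [ '"' :: (t ++ ['"'])
    , '\'' :: (t ++ ['\''])
    , ' ' :: (t ++ [' '])
    , ' ' :: (t ++ ['.'])
    , ' ' :: (t ++ [','])
    , '[' :: (t ++ [']'])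
    , '(' :: (t ++ [')'])
    , ' ' :: (t ++ ['\n']) ]
  patterns.any (fun p => PySem.Chars.isIn p s)

-- ===== PORT B =====
def pvPairs : List (Char × Char) :=
  [('"', '"'), ('\'', '\''), (' ', ' '), (' ', '.'),
   (' ', ','), ('[', ']'), ('(', ')'), (' ', '\n')]

-- the loop-body check of Source B: `j + n < len(s) and (s[j-1], s[j+n]) in pairs`
def pvGoodAt (t s : List Char) (m : Nat) : Bool :=
  decide (m + t.length < s.length)
    && pvPairs.contains (s.getD (m - 1) ' ', s.getD (m + t.length) ' ')

-- the `while j != -1` loop of Source B; the leading `s.length < j` test is a totality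
-- guard only: Python's s.find(term, j) with j past the end returns -1 as well
def pvLoop (t s : List Char) (j : Nat) : Bool :=
  if hj : s.length < j then false
  else
    if hr : PySem.Chars.findFrom s t (j : Int) none = -1 then false
    else if pvGoodAt t s (PySem.Chars.findFrom s t (j : Int) none).toNat then true
    else pvLoop t s ((PySem.Chars.findFrom s t (j : Int) none).toNat + 1)
termination_by s.length + 1 - j
decreasing_by
  have hspec := PySem.Chars.findFrom_natCast_spec s t j (Nat.le_of_not_lt hj) hr
  have _h1 : (j : Int) ≤ PySem.Chars.findFrom s t (j : Int) none := hspec.1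
  omega

def term_in_description_py_alt (term : String) (description_lower : String) : Bool :=
  pvLoop term.toList description_lower.toList 1

-- ===== PRECONDITION & SPEC =====
def Spec_term_in_description_py (term : String) (description_lower : String) (out : Bool) : Prop := out = term_in_description_py_alt term description_lower
instance (term : String) (description_lower : String) (out : Bool) : Decidable (Spec_term_in_description_py term description_lower out) := by unfold Spec_term_in_description_py; infer_instance

-- ===== CLAIM (what is proved, stated in full; the proofs are below) =====
def Claim_equal_term_in_description_py : Prop := ∀ (term : String) (description_lower : String), Dom_term_in_description_py term description_lower → Spec_term_in_description_py term description_lower (term_in_description_py term description_lower)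

-- ===== LEMMAS AND PROOFS =====

-- prefix decompositions
theorem snoc_prefix_iff (u : List Char) (b : Char) (l : List Char) :
    (u ++ [b]) <+: l ↔ u <+: l ∧ l[u.length]? = some b := by
  induction u generalizing l with
  | nil => cases l <;> simp [List.cons_prefix_cons, eq_comm]
  | cons a u ih =>
      cases l with
      | nil => simp
      | cons c l => simp [List.cons_prefix_cons, ih, and_assoc]

theorem cons_prefix_iff' (a : Char) (u l : List Char) :
    (a :: u) <+: l ↔ l[0]? = some a ∧ u <+: l.drop 1 := by
  cases l <;> simp [List.cons_prefix_cons, eq_comm]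

-- a wrapped pattern occurs in s iff term occurs at some m ≥ 1 with chars a,b around it
theorem pattern_isIn_iff (t s : List Char) (a b : Char) :
    PySem.Chars.isIn (a :: (t ++ [b])) s = true ↔
      ∃ m, 1 ≤ m ∧ t <+: s.drop m ∧ s[m - 1]? = some a ∧ s[m + t.length]? = some b := by
  rw [← PySem.Chars.exists_prefix_drop_iff_isIn]
  constructor
  · rintro ⟨i, hi⟩
    rw [cons_prefix_iff'] at hi
    obtain ⟨ha, hi⟩ := hi
    rw [snoc_prefix_iff] at hi
    obtain ⟨hpre, hb⟩ := hi
    refine ⟨i + 1, by omega, ?_, ?_, ?_⟩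
    · simpa [List.drop_drop] using hpre
    · simpa using ha
    · simpa [List.drop_drop, Nat.add_comm, Nat.add_left_comm] using hb
  · rintro ⟨m, hm, hpre, ha, hb⟩
    refine ⟨m - 1, ?_⟩
    rw [cons_prefix_iff', snoc_prefix_iff]
    have hm1 : m - 1 + 1 = m := by omega
    have e : (s.drop (m - 1)).drop 1 = s.drop m := by
      rw [List.drop_drop]; congr 1
    refine ⟨by simpa using ha, ?_, ?_⟩
    · rw [e]; exact hpre
    · rw [e, List.getElem?_drop]; exact hb

-- the propositional form of pvGoodAt (for m ≥ 1)
theorem goodAt_iff (t s : List Char) (m : Nat) (hm : 1 ≤ m) :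
    pvGoodAt t s m = true ↔
      ∃ a c, (a, c) ∈ pvPairs ∧ s[m - 1]? = some a ∧ s[m + t.length]? = some c := by
  unfold pvGoodAt
  constructor
  · intro h
    rw [Bool.and_eq_true, decide_eq_true_iff] at h
    obtain ⟨hlt, hmem⟩ := h
    have hmem' := List.contains_iff_mem.mp hmem
    have h1 : m - 1 < s.length := by omega
    have h2 : m + t.length < s.length := hlt
    exact ⟨s.getD (m - 1) ' ', s.getD (m + t.length) ' ', hmem',
      by simp [List.getD_eq_getElem?_getD, List.getElem?_eq_getElem h1],
      by simp [List.getD_eq_getElem?_getD, List.getElem?_eq_getElem h2]⟩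
  · rintro ⟨a, c, hmem, ha, hc⟩
    have h2 : m + t.length < s.length := by
      by_contra h
      rw [List.getElem?_eq_none (show s.length ≤ m + t.length by omega)] at hc
      simp at hc
    rw [Bool.and_eq_true, decide_eq_true_iff]
    refine ⟨h2, List.contains_iff_mem.mpr ?_⟩
    have ha' : s.getD (m - 1) ' ' = a := by
      simp [List.getD_eq_getElem?_getD, ha]
    have hc' : s.getD (m + t.length) ' ' = c := by
      simp [List.getD_eq_getElem?_getD, hc]
    rw [ha', hc']; exact hmem

-- correctness of the find-walk loop
theorem pvLoop_iff (t s : List Char) (j : Nat) :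
    pvLoop t s j = true ↔ ∃ m, j ≤ m ∧ t <+: s.drop m ∧ pvGoodAt t s m = true := by
  induction j using pvLoop.induct t s
  case case1 =>
    rename_i j hj
    rw [pvLoop]
    rw [dif_pos hj]
    refine iff_of_false (by simp) ?_
    rintro ⟨m, hm, _, hgood⟩
    unfold pvGoodAt at hgood
    rw [Bool.and_eq_true, decide_eq_true_iff] at hgood
    omega
  case case2 =>
    rename_i j hj hr
    rw [pvLoop, dif_neg hj, dif_pos hr]
    refine iff_of_false (by simp) ?_
    rintro ⟨m, hm, hpre, _⟩
    have hnin : ¬ (t <:+: s.drop j) :=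
      (PySem.Chars.findFrom_natCast_eq_neg_one_iff s t j (Nat.le_of_not_lt hj)).mp hr
    apply hnin
    have hsuf : s.drop m <:+ s.drop j := by
      have h : s.drop m = (s.drop j).drop (m - j) := by
        rw [List.drop_drop]
        congr 1
        omega
      rw [h]; exact List.drop_suffix _ _
    exact hpre.isInfix.trans hsuf.isInfix
  case case3 =>
    rename_i j hj hr hgood
    rw [pvLoop, dif_neg hj, dif_neg hr, if_pos hgood]
    have hspec := PySem.Chars.findFrom_natCast_spec s t j (Nat.le_of_not_lt hj) hr
    refine iff_of_true rfl ⟨(PySem.Chars.findFrom s t (j : Int) none).toNat, ?_, hspec.2.1, hgood⟩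
    have := hspec.1
    omega
  case case4 =>
    rename_i j hj hr hgood ih
    rw [pvLoop, dif_neg hj, dif_neg hr, if_neg hgood]
    rw [ih]
    have hspec := PySem.Chars.findFrom_natCast_spec s t j (Nat.le_of_not_lt hj) hr
    constructor
    · rintro ⟨m', hm', hpre, hg⟩
      have := hspec.1
      exact ⟨m', by omega, hpre, hg⟩
    · rintro ⟨m', hm', hpre, hg⟩
      refine ⟨m', ?_, hpre, hg⟩
      rcases Nat.lt_or_ge m' (PySem.Chars.findFrom s t (j : Int) none).toNat with h | h
      · exact absurd hpre (hspec.2.2 m' hm' h)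
      · rcases Nat.eq_or_lt_of_le h with h2 | h2
        · exact absurd hg (h2 ▸ hgood)
        · omega

theorem pvEquiv (term description_lower : String) :
    term_in_description_py term description_lower
      = term_in_description_py_alt term description_lower := by
  rw [Bool.eq_iff_iff]
  unfold term_in_description_py term_in_description_py_alt
  rw [pvLoop_iff]
  simp only [List.any_cons, List.any_nil, Bool.or_eq_true, Bool.or_false,
    pattern_isIn_iff]
  constructor
  · intro h
    rcases h with (⟨m,h1,h2,h3,h4⟩|⟨m,h1,h2,h3,h4⟩|⟨m,h1,h2,h3,h4⟩|⟨m,h1,h2,h3,h4⟩|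
      ⟨m,h1,h2,h3,h4⟩|⟨m,h1,h2,h3,h4⟩|⟨m,h1,h2,h3,h4⟩|⟨m,h1,h2,h3,h4⟩) <;>
      exact ⟨m, h1, h2, (goodAt_iff _ _ m h1).mpr ⟨_, _, by simp [pvPairs], h3, h4⟩⟩
  · rintro ⟨m, h1, h2, hg⟩
    obtain ⟨a, c, hmem, ha, hc⟩ := (goodAt_iff _ _ m h1).mp hg
    simp only [pvPairs, List.mem_cons, List.not_mem_nil, or_false, Prod.mk.injEq] at hmem
    rcases hmem with ⟨rfl,rfl⟩|⟨rfl,rfl⟩|⟨rfl,rfl⟩|⟨rfl,rfl⟩|⟨rfl,rfl⟩|⟨rfl,rfl⟩|⟨rfl,rfl⟩|⟨rfl,rfl⟩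
    · exact Or.inl ⟨m, h1, h2, ha, hc⟩
    · exact Or.inr (Or.inl ⟨m, h1, h2, ha, hc⟩)
    · exact Or.inr (Or.inr (Or.inl ⟨m, h1, h2, ha, hc⟩))
    · exact Or.inr (Or.inr (Or.inr (Or.inl ⟨m, h1, h2, ha, hc⟩)))
    · exact Or.inr (Or.inr (Or.inr (Or.inr (Or.inl ⟨m, h1, h2, ha, hc⟩))))
    · exact Or.inr (Or.inr (Or.inr (Or.inr (Or.inr (Or.inl ⟨m, h1, h2, ha, hc⟩)))))
    · exact Or.inr (Or.inr (Or.inr (Or.inr (Or.inr (Or.inr (Or.inl ⟨m, h1, h2, ha, hc⟩))))))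
    · exact Or.inr (Or.inr (Or.inr (Or.inr (Or.inr (Or.inr (Or.inr ⟨m, h1, h2, ha, hc⟩))))))

-- ===== VERDICT (by name: the statement is the Claim_ definition above) =====
theorem term_in_description_py_spec : Claim_equal_term_in_description_py := by
  intro term description_lower _
  unfold Spec_term_in_description_py
  exact pvEquiv term description_lower
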